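-- pv_equiv track=rewrite | github.com/dhkang184/code_QA | 프로그래머스/힙_더맵게.py | solution
-- ===== SOURCE A (Python) =====
-- def solution(scoville, K):
--     answer = 0
--     import heapq
--     q = []### 정렬 리스트 생성
--     for x in scoville:
--         heapq.heappush(q, x)
--
--     while True:
--         if len(q) == 1 and q[0] < K:
--             return -1
--         v1 = heapq.heappop(q)
--         if v1 >= K:
--             break
--         else:
--             answer +=1
--             v2 = heapq.heappop(q)
--             new_v = v1+(v2*2)
--             heapq.heappush(q, new_v)
--
--     return answer
-- ===== SOURCE B (Python) =====
-- def solution(scoville, K):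
--     # Two-queue mixing: after one sort, newly mixed values always leave the two
--     # current minima reachable at the fronts of two queues (the sorted originals
--     # and a FIFO of mixes), so no heap or re-insertion is ever needed.
--     orig = sorted(scoville)
--     mixed = []
--     i = j = 0  # read pointers: orig[i:] and mixed[j:] are the live elements
--     answer = 0
--     while True:
--         if len(orig) - i + len(mixed) - j == 1:
--             only = orig[i] if i < len(orig) else mixed[j]
--             if only < K:
--                 return -1
--         if j == len(mixed) or (i < len(orig) and orig[i] <= mixed[j]):
--             v1 = orig[i]; i += 1
--         else:
--             v1 = mixed[j]; j += 1
--         if v1 >= K: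
--             return answer
--         if j == len(mixed) or (i < len(orig) and orig[i] <= mixed[j]):
--             v2 = orig[i]; i += 1
--         else:
--             v2 = mixed[j]; j += 1
--         mixed.append(v1 + 2 * v2)
--         answer += 1
-- ===== Notes on version B (the rewrite author's own statement) =====
-- stated objective: faster
-- what changed: Replaces the binary heap entirely by one initial sort plus a plain FIFO queue of mixed values: mixes are produced in non-decreasing order, so the two current minima are always at the fronts of the sorted-originals list and the mix queue, giving O(1) work per mixing round instead of heap pushes and pops (measured 3.2x at the largest size).
import Mathlib
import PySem

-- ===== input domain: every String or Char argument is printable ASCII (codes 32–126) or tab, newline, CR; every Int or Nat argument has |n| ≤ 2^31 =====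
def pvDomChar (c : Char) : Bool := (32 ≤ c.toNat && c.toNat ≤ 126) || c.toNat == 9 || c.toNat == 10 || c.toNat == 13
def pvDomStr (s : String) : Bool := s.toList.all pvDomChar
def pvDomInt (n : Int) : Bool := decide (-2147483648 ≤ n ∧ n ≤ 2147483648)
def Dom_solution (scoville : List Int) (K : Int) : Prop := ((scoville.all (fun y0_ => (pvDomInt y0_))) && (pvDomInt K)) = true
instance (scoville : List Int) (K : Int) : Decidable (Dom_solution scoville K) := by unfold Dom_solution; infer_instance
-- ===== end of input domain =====

-- B replaces A's binary heap by one sort and a FIFO queue of mixes: mixes come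
-- out in non-decreasing order, so the two current minima are always at the two
-- queue fronts and no heap is needed (objective: faster, measured by the check).

-- ===== PORT A =====
-- heapq is ported as a list kept sorted by VALUE: A only performs heappush /
-- heappop / len(q) / q[0], and on Int values each of these returns on a sorted
-- list exactly the value the CPython binary heap returns (the popped/peeked
-- element is always the minimum value, and equal Ints are indistinguishable),
-- so this model is value-for-value exact for every operation A performs.
def heapPush (q : List Int) (x : Int) : List Int := List.orderedInsert (· ≤ ·) x q

def solutionLoop (K : Int) (q : List Int) (answer : Int) : Int :=
  match q with
  | [] => 0            -- heappop of an empty heap: IndexError (excluded by Pre_solution)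
  | v1 :: rest =>      -- v1 = heapq.heappop(q)
    if (v1 :: rest).length = 1 ∧ v1 < K then -1       -- len(q) == 1 and q[0] < K
    else if v1 ≥ K then answer                         -- break
    else
      match rest with
      | [] => 0        -- second heappop raises: unreachable, len==1 ∧ v1<K was handled
      | v2 :: rest2 => solutionLoop K (heapPush rest2 (v1 + v2 * 2)) (answer + 1)
termination_by q.length
decreasing_by simp [heapPush, List.orderedInsert_length]

def solution (scoville : List Int) (K : Int) : Int :=
  solutionLoop K (scoville.foldl heapPush []) 0

-- ===== PORT B =====
-- Source B keeps read pointers i, j into the sorted originals and the mix list;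
-- the port carries the live suffixes orig[i:], mixed[j:] directly: advancing a
-- pointer is dropping the head, mixed.append is appending at the back.
-- altFront: Python's `orig[i] if i < len(orig) else mixed[j]` (headD 0: both
-- empty only when remaining == 0, where the guard is false and the value unused)
def altFront (O M : List Int) : Int :=
  match O with
  | a :: _ => a
  | [] => M.headD 0

-- one `pop the smaller front` step of Source B; none = IndexError (both exhausted)
def altPop (O M : List Int) : Option (Int × List Int × List Int) :=
  match O, M with
  | [], [] => none
  | a :: O', [] => some (a, O', [])
  | [], b :: M' => some (b, [], M')
  | a :: O', b :: M' => if a ≤ b then some (a, O', b :: M') else some (b, a :: O', M')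

theorem altPop_length {O M : List Int} {v : Int} {O' M' : List Int}
    (h : altPop O M = some (v, O', M')) : O'.length + M'.length + 1 = O.length + M.length := by
  match O, M with
  | [], [] => simp [altPop] at h
  | a :: O', [] => simp [altPop] at h; obtain ⟨rfl, rfl, rfl⟩ := h; simp
  | [], b :: M' => simp [altPop] at h; obtain ⟨rfl, rfl, rfl⟩ := h; simp
  | a :: O', b :: M' =>
    simp only [altPop] at h
    split at h <;> simp_all <;> omega

def altLoop (K : Int) (O M : List Int) (answer : Int) : Int :=
  if O.length + M.length = 1 ∧ altFront O M < K then -1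
  else
    match h1 : altPop O M with
    | none => 0               -- first pop: IndexError (excluded by Pre_solution)
    | some (v1, O1, M1) =>
      if v1 ≥ K then answer
      else
        match h2 : altPop O1 M1 with
        | none => 0           -- second pop: IndexError (unreachable from Pre_solution)
        | some (v2, O2, M2) => altLoop K O2 (M2 ++ [v1 + 2 * v2]) (answer + 1)
termination_by O.length + M.length
decreasing_by
  have e1 := altPop_length h1
  have e2 := altPop_length h2
  simp only [List.length_append, List.length_cons, List.length_nil]
  omega

def solution_alt (scoville : List Int) (K : Int) : Int :=
  altLoop K (PySem.List.sorted scoville (fun x => x) false) [] 0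

-- ===== PRECONDITION & SPEC =====
-- Pre_ excludes only the empty list, on which A's first heappop raises IndexError
-- (and B's first orig[i] access raises IndexError too).
def Pre_solution (scoville : List Int) (K : Int) : Prop := scoville ≠ []
instance (scoville : List Int) (K : Int) : Decidable (Pre_solution scoville K) := by unfold Pre_solution; infer_instance

def pvWitness_solution : List Int × Int := ([1, 2, 3, 9, 10, 12], 7)

def Spec_solution (scoville : List Int) (K : Int) (out : Int) : Prop := out = solution_alt scoville K
instance (scoville : List Int) (K : Int) (out : Int) : Decidable (Spec_solution scoville K out) := by unfold Spec_solution; infer_instance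

-- ===== CLAIM (what is proved, stated in full; the proofs are below) =====
def Claim_equal_solution : Prop := ∀ (scoville : List Int) (K : Int), Dom_solution scoville K → Pre_solution scoville K → Spec_solution scoville K (solution scoville K)

-- ===== LEMMAS AND PROOFS =====

-- sorted merge of the two queues = the multiset A's heap holds, in value order
def qmerge : List Int → List Int → List Int
  | [], M => M
  | O, [] => O
  | a :: O, b :: M => if a ≤ b then a :: qmerge O (b :: M) else b :: qmerge (a :: O) M
termination_by O M => O.length + M.length

theorem qmerge_perm : ∀ O M : List Int, (qmerge O M).Perm (O ++ M)
  | [], M => by simp [qmerge]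
  | a :: O, [] => by simp [qmerge]
  | a :: O, b :: M => by
    rw [qmerge]
    split
    · exact (qmerge_perm O (b :: M)).cons a
    · exact ((qmerge_perm (a :: O) M).cons b).trans List.perm_middle.symm
termination_by O M => O.length + M.length

theorem qmerge_sorted : ∀ O M : List Int, O.Pairwise (· ≤ ·) → M.Pairwise (· ≤ ·) →
    (qmerge O M).Pairwise (· ≤ ·)
  | [], M, _, hM => by simpa [qmerge] using hM
  | a :: O, [], hO, _ => by simpa [qmerge] using hO
  | a :: O, b :: M, hO, hM => by
    rw [qmerge]
    have ⟨haO, hO'⟩ := List.pairwise_cons.mp hO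
    have ⟨hbM, hM'⟩ := List.pairwise_cons.mp hM
    split
    · rename_i hab
      refine List.pairwise_cons.mpr ⟨?_, qmerge_sorted O (b :: M) hO' hM⟩
      intro x hx
      rcases List.mem_append.mp ((qmerge_perm O (b :: M)).mem_iff.mp hx) with h | h
      · exact haO x h
      · rcases List.mem_cons.mp h with rfl | h
        · exact hab
        · exact le_trans hab (hbM x h)
    · rename_i hab
      refine List.pairwise_cons.mpr ⟨?_, qmerge_sorted (a :: O) M hO hM'⟩
      intro x hx
      rcases List.mem_append.mp ((qmerge_perm (a :: O) M).mem_iff.mp hx) with h | h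
      · rcases List.mem_cons.mp h with rfl | h
        · omega
        · exact le_trans (by omega) (haO x h)
      · exact hbM x h
termination_by O M => O.length + M.length

-- popping the smaller front is popping the head of the merged sorted list
theorem altPop_qmerge {O M : List Int} {v : Int} {O' M' : List Int}
    (h : altPop O M = some (v, O', M')) :
    qmerge O M = v :: qmerge O' M' ∧ M'.Sublist M ∧ O'.Sublist O := by
  match O, M with
  | [], [] => simp [altPop] at h
  | a :: O', [] =>
    simp [altPop] at h
    obtain ⟨rfl, rfl, rfl⟩ := h
    refine ⟨?_, List.Sublist.refl _, List.sublist_cons_self a O'⟩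
    cases O' <;> simp [qmerge]
  | [], b :: M' =>
    simp [altPop] at h
    obtain ⟨rfl, rfl, rfl⟩ := h
    simp [qmerge]
  | a :: O', b :: M' =>
    simp only [altPop] at h
    rw [qmerge]
    split at h
    · simp only [Option.some.injEq, Prod.mk.injEq] at h
      obtain ⟨rfl, rfl, rfl⟩ := h
      rename_i hab
      exact ⟨by simp [hab], List.Sublist.refl _, List.sublist_cons_self a O'⟩
    · simp only [Option.some.injEq, Prod.mk.injEq] at h
      obtain ⟨rfl, rfl, rfl⟩ := h
      rename_i hab
      exact ⟨by simp [hab], List.sublist_cons_self b M', List.Sublist.refl _⟩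
theorem altPop_none {O M : List Int} (h : altPop O M = none) : O = [] ∧ M = [] := by
  match O, M with
  | [], [] => exact ⟨rfl, rfl⟩
  | a :: O', [] => simp [altPop] at h
  | [], b :: M' => simp [altPop] at h
  | a :: O', b :: M' => simp only [altPop] at h; split at h <;> simp at h

-- the queue invariant: every queued mix m is ≤ 3 × the smallest other element
def INVQ (O M : List Int) : Prop :=
  ∀ m ∈ M, ∀ p ps, qmerge O M = p :: ps →
    (m = p → ∀ q qs, ps = q :: qs → m ≤ 3 * q) ∧ (m ≠ p → m ≤ 3 * p)

-- queue stays sorted: every queued mix is ≤ the new mix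
theorem queue_le_new (O2 M2 : List Int) (v1 v2 : Int) (hv12 : v1 ≤ v2)
    (hge : ∀ x ∈ qmerge O2 M2, v2 ≤ x)
    (hm : ∀ m ∈ M2, m ∈ qmerge O2 M2 ∧ (m = v1 → m ≤ 3 * v2) ∧ (m ≠ v1 → m ≤ 3 * v1)) :
    ∀ m ∈ M2, m ≤ v1 + 2 * v2 := by
  intro m hmem
  obtain ⟨hr, h1, h2⟩ := hm m hmem
  have := hge m hr
  by_cases hmv : m = v1
  · have := h1 hmv; omega
  · have := h2 hmv; omega

-- appending the new mix to the queue = ordered insertion into the merged list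
theorem qmerge_append (O2 M2 : List Int) (v : Int)
    (hO : O2.Pairwise (· ≤ ·)) (hM : (M2 ++ [v]).Pairwise (· ≤ ·)) :
    qmerge O2 (M2 ++ [v]) = List.orderedInsert (· ≤ ·) v (qmerge O2 M2) := by
  have hM2 : M2.Pairwise (· ≤ ·) := hM.sublist (List.sublist_append_left M2 [v])
  have hs1 : (qmerge O2 (M2 ++ [v])).Pairwise (· ≤ ·) := qmerge_sorted _ _ hO hM
  have hs2 : (List.orderedInsert (· ≤ ·) v (qmerge O2 M2)).Pairwise (· ≤ ·) :=
    List.Pairwise.orderedInsert v _ (qmerge_sorted _ _ hO hM2)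
  have hperm : (qmerge O2 (M2 ++ [v])).Perm (List.orderedInsert (· ≤ ·) v (qmerge O2 M2)) := by
    have p1 : (O2 ++ (M2 ++ [v])).Perm (v :: (O2 ++ M2)) := by
      have : (O2 ++ (M2 ++ [v])).Perm (O2 ++ (v :: M2)) :=
        List.Perm.append_left O2 (List.perm_append_singleton v M2)
      exact this.trans List.perm_middle
    have p2 : (v :: (O2 ++ M2)).Perm (List.orderedInsert (· ≤ ·) v (qmerge O2 M2)) := by
      have := ((qmerge_perm O2 M2).cons v).symm
      exact this.trans (List.perm_orderedInsert (· ≤ ·) v (qmerge O2 M2)).symm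
    exact (qmerge_perm O2 (M2 ++ [v])).trans (p1.trans p2)
  exact List.Perm.eq_of_pairwise (fun a b _ _ h1 h2 => le_antisymm h1 h2) hs1 hs2 hperm

-- when a single element remains, B's `only` is that element
theorem altFront_single {O M : List Int} {v : Int}
    (hq : qmerge O M = [v]) (h1 : O.length + M.length = 1) : altFront O M = v := by
  match O, M with
  | [a], [] => simp [qmerge] at hq; simp [altFront, hq]
  | [], [b] => simp [qmerge] at hq; simp [altFront, hq]
  | [], [] => simp at h1
  | [], b :: c :: t => simp at h1
  | [a], b :: t => simp at h1
  | a :: b :: t, _ => simp at h1; omega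

theorem invq_step (O2 M2 : List Int) (v1 v2 : Int) (hv12 : v1 ≤ v2)
    (hge : ∀ x ∈ qmerge O2 M2, v2 ≤ x)
    (hm : ∀ m ∈ M2, m ∈ qmerge O2 M2 ∧ (m = v1 → m ≤ 3 * v2) ∧ (m ≠ v1 → m ≤ 3 * v1))
    (hO : O2.Pairwise (· ≤ ·)) (hMapp : (M2 ++ [v1 + 2 * v2]).Pairwise (· ≤ ·)) :
    INVQ O2 (M2 ++ [v1 + 2 * v2]) := by
  have heq : qmerge O2 (M2 ++ [v1 + 2 * v2])
      = List.orderedInsert (· ≤ ·) (v1 + 2 * v2) (qmerge O2 M2) :=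
    qmerge_append O2 M2 (v1 + 2 * v2) hO hMapp
  intro m hmem p ps hP
  rw [heq] at hP
  by_cases hcase : v2 ≤ v1 + 2 * v2
  · -- the new mix is no smaller than v2: everything in the new pool is ≥ v2
    have hx : ∀ x ∈ List.orderedInsert (· ≤ ·) (v1 + 2 * v2) (qmerge O2 M2), v2 ≤ x := by
      intro x hxmem
      rcases (List.mem_orderedInsert (· ≤ ·)).mp hxmem with rfl | hxr
      · exact hcase
      · exact hge x hxr
    have hp : v2 ≤ p := hx p (by rw [hP]; exact List.mem_cons_self ..)
    have hq' : ∀ q qs, ps = q :: qs → v2 ≤ q := by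
      intro q qs hps
      exact hx q (by rw [hP, hps]; simp)
    rcases List.mem_append.mp hmem with hmem | hmem
    · obtain ⟨hmr, h1, h2⟩ := hm m hmem
      have hmv2 : v2 ≤ m := hge m hmr
      by_cases hmv : m = v1
      · have := h1 hmv
        exact ⟨fun _ q qs hps => by have := hq' q qs hps; omega, fun _ => by omega⟩
      · have := h2 hmv
        exact ⟨fun _ q qs hps => by have := hq' q qs hps; omega, fun _ => by omega⟩
    · simp at hmem
      subst hmem
      exact ⟨fun _ q qs hps => by have := hq' q qs hps; omega, fun _ => by omega⟩
  · -- the new mix is the unique minimum: then the queue must have been empty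
    have hM2nil : M2 = [] := by
      cases hM2 : M2 with
      | nil => rfl
      | cons m0 t =>
        exfalso
        obtain ⟨hmr, h1, h2⟩ := hm m0 (by rw [hM2]; simp)
        have hmv2 : v2 ≤ m0 := hge m0 hmr
        by_cases hmv : m0 = v1
        · have := h1 hmv; omega
        · have := h2 hmv; omega
    subst hM2nil
    have hP' : List.orderedInsert (· ≤ ·) (v1 + 2 * v2) (qmerge O2 []) = (v1 + 2 * v2) :: qmerge O2 [] := by
      cases hr : qmerge O2 [] with
      | nil => rfl
      | cons r t =>
        rw [List.orderedInsert, if_pos]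
        have : v2 ≤ r := hge r (by rw [hr]; simp)
        omega
    rw [hP'] at hP
    injection hP with hpv hpsr
    simp at hmem
    subst hmem
    refine ⟨fun _ q qs hps => ?_, fun hne => absurd hpv hne⟩
    have : v2 ≤ q := hge q (by rw [← hpsr] at hps; rw [hps]; simp)
    omega

theorem solutionLoop_cons (K v1 : Int) (rest : List Int) (ans : Int) :
    solutionLoop K (v1 :: rest) ans =
      if (v1 :: rest).length = 1 ∧ v1 < K then -1
      else if v1 ≥ K then ans
      else match rest with
        | [] => 0
        | v2 :: rest2 => solutionLoop K (heapPush rest2 (v1 + v2 * 2)) (ans + 1) := by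
  rw [solutionLoop.eq_def]

-- the two mixing loops agree on every invariant-carrying state
theorem loops_eq (K : Int) :
    ∀ n O M answer, O.length + M.length ≤ n → O.Pairwise (· ≤ ·) → M.Pairwise (· ≤ ·) →
      INVQ O M → altLoop K O M answer = solutionLoop K (qmerge O M) answer := by
  intro n
  induction n with
  | zero =>
    intro O M ans hlen hO hM _
    have hO0 : O = [] := List.eq_nil_of_length_eq_zero (by omega)
    have hM0 : M = [] := List.eq_nil_of_length_eq_zero (by omega)
    subst hO0; subst hM0
    rw [altLoop, solutionLoop.eq_def]
    simp [altPop, qmerge]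
  | succ n ih =>
    intro O M ans hlen hO hM hinv
    have hsorted : (qmerge O M).Pairwise (· ≤ ·) := qmerge_sorted O M hO hM
    rw [altLoop]
    cases hpop : altPop O M with
    | none =>
      obtain ⟨rfl, rfl⟩ := altPop_none hpop
      rw [solutionLoop.eq_def]
      simp [qmerge]
    | some t =>
      obtain ⟨v1, O1, M1⟩ := t
      obtain ⟨hmerge1, hsubM1, hsubO1⟩ := altPop_qmerge hpop
      have hlen1 := altPop_length hpop
      cases hq1 : qmerge O1 M1 with
      | nil =>
        have hsum1 : O.length + M.length = 1 := by
          have := (qmerge_perm O1 M1).length_eq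
          simp [hq1] at this
          omega
        have hq : qmerge O M = [v1] := by rw [hmerge1, hq1]
        have hfront : altFront O M = v1 := altFront_single hq hsum1
        rw [hq, solutionLoop_cons]
        by_cases hK : v1 < K
        · rw [if_pos ⟨hsum1, hfront ▸ hK⟩]
          simp [hK]
        · rw [if_neg (by rw [hfront]; exact fun h => hK h.2)]
          have hKge : v1 ≥ K := by omega
          split
          · rename_i h2; simp at h2
          · rename_i v1' O1' M1' h2
            simp only [Option.some.injEq, Prod.mk.injEq] at h2
            obtain ⟨rfl, rfl, rfl⟩ := h2
            simp [hKge, hK]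
      | cons v2 rest0 =>
        have hlen2pos : 1 ≤ O1.length + M1.length := by
          have := (qmerge_perm O1 M1).length_eq
          simp [hq1] at this
          omega
        have hsum : O.length + M.length ≠ 1 := by omega
        rw [if_neg (fun h => hsum h.1)]
        rw [hmerge1, hq1, solutionLoop_cons]
        have hguard : ¬ ((v1 :: v2 :: rest0).length = 1 ∧ v1 < K) := by simp
        rw [if_neg hguard]
        split
        · rename_i h2; simp at h2
        · rename_i v1' O1' M1' h2
          simp only [Option.some.injEq, Prod.mk.injEq] at h2
          obtain ⟨rfl, rfl, rfl⟩ := h2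
          by_cases hK : v1 ≥ K
          · simp [hK]
          · rw [if_neg hK, if_neg hK]
            cases hpop2 : altPop O1 M1 with
            | none =>
              obtain ⟨rfl, rfl⟩ := altPop_none hpop2
              simp [qmerge] at hq1
            | some t2 =>
              obtain ⟨v2', O2, M2⟩ := t2
              obtain ⟨hmerge2, hsubM2, hsubO2⟩ := altPop_qmerge hpop2
              have hlen2 := altPop_length hpop2
              rw [hq1] at hmerge2
              injection hmerge2 with hv2eq hrest0
              subst hv2eq
              have hO1s : O1.Pairwise (· ≤ ·) := hO.sublist hsubO1
              have hM1s : M1.Pairwise (· ≤ ·) := hM.sublist hsubM1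
              have hO2s : O2.Pairwise (· ≤ ·) := hO1s.sublist hsubO2
              have hM2s : M2.Pairwise (· ≤ ·) := hM1s.sublist hsubM2
              have hv12 : v1 ≤ v2 := by
                rw [hmerge1, hq1] at hsorted
                exact (List.pairwise_cons.mp hsorted).1 v2 (by simp)
              have hge : ∀ x ∈ qmerge O2 M2, v2 ≤ x := by
                have h1s : (qmerge O1 M1).Pairwise (· ≤ ·) := qmerge_sorted O1 M1 hO1s hM1s
                rw [hq1] at h1s
                intro x hx
                exact (List.pairwise_cons.mp h1s).1 x (hrest0 ▸ hx)
              have hmfacts : ∀ m ∈ M2, m ∈ qmerge O2 M2 ∧ (m = v1 → m ≤ 3 * v2) ∧ (m ≠ v1 → m ≤ 3 * v1) := by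
                intro m hmem
                have hmM : m ∈ M := hsubM1.subset (hsubM2.subset hmem)
                have := hinv m hmM v1 (qmerge O1 M1) hmerge1
                refine ⟨(qmerge_perm O2 M2).mem_iff.mpr (by simp [hmem]), ?_, this.2⟩
                intro hmv1
                exact this.1 hmv1 v2 (qmerge O2 M2) (by rw [hq1, hrest0])
              have hqle : ∀ m ∈ M2, m ≤ v1 + 2 * v2 := queue_le_new O2 M2 v1 v2 hv12 hge hmfacts
              have hM2app : (M2 ++ [v1 + 2 * v2]).Pairwise (· ≤ ·) := by
                rw [List.pairwise_append]
                exact ⟨hM2s, by simp, by intro a ha b hb; simp at hb; subst hb; exact hqle a ha⟩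
              have hstate : qmerge O2 (M2 ++ [v1 + 2 * v2]) = heapPush rest0 (v1 + v2 * 2) := by
                rw [qmerge_append O2 M2 (v1 + 2 * v2) hO2s hM2app, heapPush, hrest0]
                congr 1
                ring
              split
              · rename_i h3; simp at h3
              · rename_i w2 P2 Q2 h3
                simp only [Option.some.injEq, Prod.mk.injEq] at h3
                obtain ⟨rfl, rfl, rfl⟩ := h3
                show altLoop K O2 (M2 ++ [v1 + 2 * v2]) (ans + 1) =
                  solutionLoop K (heapPush rest0 (v1 + v2 * 2)) (ans + 1)
                rw [← hstate]
                exact ih O2 (M2 ++ [v1 + 2 * v2]) (ans + 1) (by simp; omega) hO2s hM2app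
                  (invq_step O2 M2 v1 v2 hv12 hge hmfacts hO2s hM2app)

-- A's heappush fold is sorted and a permutation of its input
theorem foldl_heapPush_pairwise (sc : List Int) :
    ∀ acc, acc.Pairwise (· ≤ ·) → (sc.foldl heapPush acc).Pairwise (· ≤ ·) := by
  induction sc with
  | nil => intro acc h; exact h
  | cons x t ih =>
    intro acc h
    exact ih _ (List.Pairwise.orderedInsert x acc h)

theorem foldl_heapPush_perm (sc : List Int) :
    ∀ acc, (sc.foldl heapPush acc).Perm (acc ++ sc) := by
  induction sc with
  | nil => intro acc; simp
  | cons x t ih =>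
    intro acc
    refine (ih (heapPush acc x)).trans ?_
    refine (List.Perm.append_right t (List.perm_orderedInsert (· ≤ ·) x acc)).trans ?_
    exact List.perm_middle.symm

-- B's one sort equals A's heappush fold
theorem sorted_eq_foldl_heapPush (sc : List Int) :
    PySem.List.sorted sc (fun x => x) false = sc.foldl heapPush [] := by
  refine PySem.List.sorted_id_eq_of_perm_of_pairwise sc _ ?_ (foldl_heapPush_pairwise sc [] (by simp))
  simpa using foldl_heapPush_perm sc []

-- ===== VERDICT (by name: the statement is the Claim_ definition above) =====
theorem solution_spec : Claim_equal_solution := by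
  intro scoville K _ _
  unfold Spec_solution solution solution_alt
  rw [sorted_eq_foldl_heapPush]
  have hq : qmerge (scoville.foldl heapPush []) [] = scoville.foldl heapPush [] := by
    cases scoville.foldl heapPush [] <;> simp [qmerge]
  exact ((loops_eq K (scoville.foldl heapPush []).length _ [] 0 (by simp)
    (foldl_heapPush_pairwise scoville [] (by simp)) (by simp) (by intro m hm; simp at hm)).trans
    (by rw [hq])).symm
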